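-- pv_equiv track=rewrite | github.com/bzantium/megatext | src/megatext/data/data_sources.py | _get_num_epochs
-- ===== SOURCE A (Python) =====
-- def _get_num_epochs(
--     num_samples: int, tokens_per_epoch: int, seq_len: int, add_extra_token: bool
-- ) -> int:
--     """Megatron pattern: keep adding epochs until tokens >= num_samples * seq_len."""
--     num_epochs = 1
--     num_tokens = tokens_per_epoch
--     num_tokens_requested = num_samples * seq_len + int(add_extra_token)
--     while num_tokens < num_tokens_requested:
--         num_epochs += 1
--         num_tokens += tokens_per_epoch
--     return num_epochs
-- ===== SOURCE B (Python) =====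
-- def _get_num_epochs(
--     num_samples: int, tokens_per_epoch: int, seq_len: int, add_extra_token: bool
-- ) -> int:
--     """Closed form: smallest positive epoch count whose tokens reach the request."""
--     num_tokens_requested = num_samples * seq_len + int(add_extra_token)
--     return max(1, -(-num_tokens_requested // tokens_per_epoch))
-- ===== Notes on version B (the rewrite author's own statement) =====
-- stated objective: faster
-- what changed: Replaced the epoch-accumulating while loop by the closed-form ceiling division max(1, ceil(requested/tokens_per_epoch)).
-- outside the precondition, e.g. on _get_num_epochs(-1, -2, 3, False): A returns 1, B returns 2; on _get_num_epochs(1, 0, 1, False): A does not finish within the time limit, B raises ZeroDivisionError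
import Mathlib
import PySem

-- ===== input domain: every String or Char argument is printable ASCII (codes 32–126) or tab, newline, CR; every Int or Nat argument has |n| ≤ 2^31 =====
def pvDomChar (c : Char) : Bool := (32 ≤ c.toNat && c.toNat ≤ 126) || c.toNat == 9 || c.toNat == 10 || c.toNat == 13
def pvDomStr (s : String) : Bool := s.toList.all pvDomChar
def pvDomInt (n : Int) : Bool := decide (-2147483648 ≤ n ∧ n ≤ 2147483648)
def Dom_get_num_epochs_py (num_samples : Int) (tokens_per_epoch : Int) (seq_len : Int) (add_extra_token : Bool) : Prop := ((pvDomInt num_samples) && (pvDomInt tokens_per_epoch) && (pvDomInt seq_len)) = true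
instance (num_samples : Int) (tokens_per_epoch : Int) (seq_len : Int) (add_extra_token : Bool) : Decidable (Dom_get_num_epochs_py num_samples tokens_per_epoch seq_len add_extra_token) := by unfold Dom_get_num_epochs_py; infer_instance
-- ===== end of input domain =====

-- B replaces A's epoch-accumulating while loop by one ceiling division (closed form, O(1)).

-- ===== PORT A =====
-- the while loop of A; the `0 < tpe` conjunct is only a totality guard (Python's
-- loop diverges when tpe ≤ 0 and the condition holds; Pre_ excludes tpe ≤ 0)
def pvLoopA (tpe req : Int) (num_epochs num_tokens : Int) : Int :=
  if h : num_tokens < req ∧ 0 < tpe then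
    pvLoopA tpe req (num_epochs + 1) (num_tokens + tpe)
  else num_epochs
termination_by (req - num_tokens).toNat
decreasing_by omega

def get_num_epochs_py (num_samples : Int) (tokens_per_epoch : Int) (seq_len : Int) (add_extra_token : Bool) : Int :=
  pvLoopA tokens_per_epoch (num_samples * seq_len + (if add_extra_token then 1 else 0)) 1 tokens_per_epoch

-- ===== PORT B =====
def get_num_epochs_py_alt (num_samples : Int) (tokens_per_epoch : Int) (seq_len : Int) (add_extra_token : Bool) : Int :=
  let num_tokens_requested := num_samples * seq_len + (if add_extra_token then 1 else 0)
  max 1 (-(PySem.Int.floordiv (-num_tokens_requested) tokens_per_epoch))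

-- ===== PRECONDITION & SPEC =====
-- Pre_ restricts to the natural domain of a positive epoch size: for tokens_per_epoch ≤ 0
-- Python A either diverges (loop condition never cleared) or returns 1 only because the
-- degenerate request is already met, and B's ceiling division divides by zero at 0.
def Pre_get_num_epochs_py (num_samples : Int) (tokens_per_epoch : Int) (seq_len : Int) (add_extra_token : Bool) : Prop :=
  0 < tokens_per_epoch
instance (num_samples : Int) (tokens_per_epoch : Int) (seq_len : Int) (add_extra_token : Bool) : Decidable (Pre_get_num_epochs_py num_samples tokens_per_epoch seq_len add_extra_token) := by unfold Pre_get_num_epochs_py; infer_instance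
def pvWitness_get_num_epochs_py : Int × Int × Int × Bool := (10, 3, 4, true)
def Spec_get_num_epochs_py (num_samples : Int) (tokens_per_epoch : Int) (seq_len : Int) (add_extra_token : Bool) (out : Int) : Prop := out = get_num_epochs_py_alt num_samples tokens_per_epoch seq_len add_extra_token
instance (num_samples : Int) (tokens_per_epoch : Int) (seq_len : Int) (add_extra_token : Bool) (out : Int) : Decidable (Spec_get_num_epochs_py num_samples tokens_per_epoch seq_len add_extra_token out) := by unfold Spec_get_num_epochs_py; infer_instance

-- ===== CLAIM (what is proved, stated in full; the proofs are below) =====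
def Claim_equal_get_num_epochs_py : Prop := ∀ (num_samples : Int) (tokens_per_epoch : Int) (seq_len : Int) (add_extra_token : Bool), Dom_get_num_epochs_py num_samples tokens_per_epoch seq_len add_extra_token → Pre_get_num_epochs_py num_samples tokens_per_epoch seq_len add_extra_token → Spec_get_num_epochs_py num_samples tokens_per_epoch seq_len add_extra_token (get_num_epochs_py num_samples tokens_per_epoch seq_len add_extra_token)

-- ===== LEMMAS AND PROOFS =====
-- the loop computes epochs plus the number of further steps, i.e. the ceiling of the deficit
theorem pvLoopA_eq (tpe req : Int) (htpe : 0 < tpe) :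
    ∀ (e t : Int), pvLoopA tpe req e t = e + max 0 (-(PySem.Int.floordiv (t - req) tpe)) := by
  intro e t
  induction e, t using pvLoopA.induct tpe req with
  | case1 e t h ih =>
    rw [pvLoopA, dif_pos h, ih]
    have h1 := PySem.Int.floordiv_mul_add_mod (t - req) tpe
    have h2 := PySem.Int.floordiv_mul_add_mod (t + tpe - req) tpe
    have hm1a := PySem.Int.mod_nonneg (t - req) htpe
    have hm1b := PySem.Int.mod_lt (t - req) htpe
    have hm2a := PySem.Int.mod_nonneg (t + tpe - req) htpe
    have hm2b := PySem.Int.mod_lt (t + tpe - req) htpe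
    have : PySem.Int.floordiv (t + tpe - req) tpe = PySem.Int.floordiv (t - req) tpe + 1 := by
      nlinarith [hm1a, hm1b, hm2a, hm2b]
    rw [this]
    have hneg : PySem.Int.floordiv (t - req) tpe < 0 := by
      rw [PySem.Int.floordiv_lt_iff_lt_mul htpe]; omega
    omega
  | case2 e t h =>
    rw [pvLoopA, dif_neg h]
    have ht : ¬ t < req := fun hc => h ⟨hc, htpe⟩
    have : 0 ≤ PySem.Int.floordiv (t - req) tpe := by
      rw [PySem.Int.le_floordiv_iff_mul_le htpe]; omega
    omega

-- ===== VERDICT (by name: the statement is the Claim_ definition above) =====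
theorem get_num_epochs_py_spec : Claim_equal_get_num_epochs_py := by
  intro ns tpe sl ae _hd hpre
  unfold Spec_get_num_epochs_py get_num_epochs_py get_num_epochs_py_alt
  set req := ns * sl + (if ae then (1:Int) else 0) with hreq
  rw [pvLoopA_eq tpe req hpre 1 tpe]
  have h1 := PySem.Int.floordiv_mul_add_mod (tpe - req) tpe
  have h2 := PySem.Int.floordiv_mul_add_mod (-req) tpe
  have hm1a := PySem.Int.mod_nonneg (tpe - req) hpre
  have hm1b := PySem.Int.mod_lt (tpe - req) hpre
  have hm2a := PySem.Int.mod_nonneg (-req) hpre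
  have hm2b := PySem.Int.mod_lt (-req) hpre
  have hshift : PySem.Int.floordiv (tpe - req) tpe = PySem.Int.floordiv (-req) tpe + 1 := by
    nlinarith [hm1a, hm1b, hm2a, hm2b]
  simp only [hshift]
  omega
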